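-- pv_equiv track=rewrite | github.com/Yoon-men/CodingTest | BaekJoon/14659.py | joyGo
-- ===== SOURCE A (Python) =====
-- from typing import List
--
-- def joyGo(height: List[int]) :
--     ans = 0
--     max_height = 0
--     cnt = 0
--
--     for h in height :
--         if h > max_height :
--             cnt = 0
--             max_height = h
--         else :
--             cnt += 1
--
--         ans = max(cnt, ans)
--
--     return ans
-- ===== SOURCE B (Python) =====
-- from typing import List
--
-- def joyGo(height: List[int]):
--     # segment decomposition: scan forward segment by segment; each segment is the
--     # maximal run of hills not exceeding the current record, ended by a new record.
--     ans = 0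
--     mx = 0
--     i = 0
--     n = len(height)
--     while True:
--         j = i
--         while j < n and height[j] <= mx:
--             j += 1
--         ans = max(ans, j - i)
--         if j >= n:
--             break
--         mx = height[j]
--         i = j + 1
--     return ans
-- ===== Notes on version B (the rewrite author's own statement) =====
-- stated objective: alternative
-- what changed: Replaced the single element-wise sweep maintaining (ans, max_height, cnt) by a segment decomposition: scan forward in maximal runs of hills not exceeding the current record (inner run loop), take the longest run length; no per-element counter/answer/max update.
import Mathlib
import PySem

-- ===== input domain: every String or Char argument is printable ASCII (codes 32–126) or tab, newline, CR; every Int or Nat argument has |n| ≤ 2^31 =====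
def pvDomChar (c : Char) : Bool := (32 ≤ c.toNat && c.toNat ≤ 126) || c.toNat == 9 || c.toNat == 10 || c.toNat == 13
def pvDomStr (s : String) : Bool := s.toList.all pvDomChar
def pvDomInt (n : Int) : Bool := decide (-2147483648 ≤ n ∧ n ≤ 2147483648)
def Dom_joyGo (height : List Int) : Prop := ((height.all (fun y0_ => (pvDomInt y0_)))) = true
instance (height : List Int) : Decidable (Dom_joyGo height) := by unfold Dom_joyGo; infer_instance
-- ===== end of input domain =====

-- B replaces A's single element-wise sweep by a segment-by-segment scan (alternative decomposition, same cost).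

-- ===== PORT A =====
-- literal transliteration of A's loop: state (ans, max_height, cnt), updated per element
def joyGo (height : List Int) : Int :=
  (height.foldl (fun (s : Int × Int × Int) h =>
      let ans := s.1; let max_height := s.2.1; let cnt := s.2.2
      if h > max_height then
        (max (0 : Int) ans, h, 0)
      else
        (max (cnt + 1) ans, max_height, cnt + 1))
    (0, 0, 0)).1

-- ===== PORT B =====
-- helper: the inner run loop of Source B — a maximal run of hills ≤ mx (takeWhile),
-- then recurse past the new record; mirrors Source B's outer while-loop.
def joyGoSeg (mx : Int) (xs : List Int) : Int :=
  match hrest : xs.dropWhile (fun x => decide (x ≤ mx)) with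
  | [] => ((xs.takeWhile (fun x => decide (x ≤ mx))).length : Int)
  | h :: t =>
      max ((xs.takeWhile (fun x => decide (x ≤ mx))).length : Int) (joyGoSeg h t)
termination_by xs.length
decreasing_by
  have h1 : (xs.dropWhile (fun x => decide (x ≤ mx))).length ≤ xs.length :=
    List.length_dropWhile_le _ _
  rw [hrest] at h1
  simpa using Nat.lt_of_lt_of_le (Nat.lt_succ_self _) h1

def joyGo_alt (height : List Int) : Int := joyGoSeg 0 height

-- ===== PRECONDITION & SPEC =====
def Spec_joyGo (height : List Int) (out : Int) : Prop := out = joyGo_alt height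
instance (height : List Int) (out : Int) : Decidable (Spec_joyGo height out) := by unfold Spec_joyGo; infer_instance

-- ===== CLAIM (what is proved, stated in full; the proofs are below) =====
def Claim_equal_joyGo : Prop := ∀ (height : List Int), Dom_joyGo height → Spec_joyGo height (joyGo height)

-- ===== LEMMAS AND PROOFS =====

-- A's loop body as a standalone step
def stepA (s : Int × Int × Int) (h : Int) : Int × Int × Int :=
  let ans := s.1; let max_height := s.2.1; let cnt := s.2.2
  if h > max_height then
    (max (0 : Int) ans, h, 0)
  else
    (max (cnt + 1) ans, max_height, cnt + 1)

theorem joyGo_eq_foldl_stepA (height : List Int) :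
    joyGo height = (height.foldl stepA (0, 0, 0)).1 := rfl

theorem joyGoSeg_nonneg (mx : Int) (xs : List Int) : 0 ≤ joyGoSeg mx xs := by
  fun_induction joyGoSeg mx xs with
  | case1 mx xs h => positivity
  | case2 mx xs hd tl h ih => exact le_max_of_le_right ih

theorem loopA_eq (xs : List Int) : ∀ (mx ans cnt : Int), 0 ≤ cnt → cnt ≤ ans →
    (xs.foldl stepA (ans, mx, cnt)).1 =
      max ans
        (match xs.dropWhile (fun x => decide (x ≤ mx)) with
         | [] => cnt + ((xs.takeWhile (fun x => decide (x ≤ mx))).length : Int)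
         | h :: t =>
             max (cnt + ((xs.takeWhile (fun x => decide (x ≤ mx))).length : Int)) (joyGoSeg h t)) := by
  induction xs with
  | nil => intro mx ans cnt h0 hca; simp [List.foldl]; omega
  | cons x t ih =>
      intro mx ans cnt h0 hca
      by_cases hle : x ≤ mx
      · -- x stays in the current segment: cnt increments
        have hstep : stepA (ans, mx, cnt) x = (max (cnt + 1) ans, mx, cnt + 1) := by
          simp [stepA, not_lt.mpr hle]
        rw [List.foldl_cons, hstep,
          ih mx (max (cnt + 1) ans) (cnt + 1) (by omega) (le_max_left _ _)]
        simp only [List.takeWhile_cons, List.dropWhile_cons, decide_eq_true hle,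
          if_pos trivial, List.length_cons]
        rcases hd : t.dropWhile (fun x => decide (x ≤ mx)) with _ | ⟨h, u⟩
        · push_cast; omega
        · have hseg := joyGoSeg_nonneg h u
          push_cast; omega
      · -- x is a new record: reset
        have hgt : mx < x := lt_of_not_ge hle
        have hstep : stepA (ans, mx, cnt) x = (max (0 : Int) ans, x, 0) := by
          simp [stepA, hgt]
        have hmax0 : max (0 : Int) ans = ans := max_eq_right (le_trans h0 hca)
        rw [List.foldl_cons, hstep, hmax0, ih x ans 0 le_rfl (le_trans h0 hca)]
        simp only [List.takeWhile_cons, List.dropWhile_cons, decide_eq_false hle,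
          Bool.false_eq_true, if_false, List.length_nil]
        rw [joyGoSeg]
        rcases hd : t.dropWhile (fun y => decide (y ≤ x)) with _ | ⟨h, u⟩
        · simp; omega
        · have h1 := joyGoSeg_nonneg h u
          have h2 : (0:Int) ≤ ((t.takeWhile (fun y => decide (y ≤ x))).length : Int) := by positivity
          simp only [Int.zero_add]
          omega

-- ===== VERDICT (by name: the statement is the Claim_ definition above) =====
theorem joyGo_spec : Claim_equal_joyGo := by
  intro height _
  unfold Spec_joyGo
  rw [joyGo_eq_foldl_stepA, loopA_eq height 0 0 0 le_rfl le_rfl]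
  unfold joyGo_alt
  rw [joyGoSeg]
  rcases hd : height.dropWhile (fun x => decide (x ≤ (0:Int))) with _ | ⟨h, t⟩
  · simp
  · have h1 := joyGoSeg_nonneg h t
    have h2 : (0:Int) ≤ ((height.takeWhile (fun y => decide (y ≤ (0:Int)))).length : Int) := by positivity
    simp only [Int.zero_add]
    omega
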